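-- pv_equiv track=rewrite | github.com/NicolayP/mppi-rexrov2 | scripts/metric_utile.py | get_label_title
-- ===== SOURCE A (Python) =====
-- def get_label_title(entries):
--     title = ""
--     for entry in entries:
--         if entry == "filter_seq":
--             title = "filter"
--         else:
--             title = entry
--     return title
-- ===== SOURCE B (Python) =====
-- def get_label_title(entries):
--     if not entries:
--         return ""
--     last = entries[-1]
--     return "filter" if last == "filter_seq" else last
-- ===== Notes on version B (the rewrite author's own statement) =====
-- stated objective: simpler
-- what changed: Replaces the whole-list overwrite loop with a direct read of the last element (empty list returns ""), applying the same filter_seq->filter mapping.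
import Mathlib
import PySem

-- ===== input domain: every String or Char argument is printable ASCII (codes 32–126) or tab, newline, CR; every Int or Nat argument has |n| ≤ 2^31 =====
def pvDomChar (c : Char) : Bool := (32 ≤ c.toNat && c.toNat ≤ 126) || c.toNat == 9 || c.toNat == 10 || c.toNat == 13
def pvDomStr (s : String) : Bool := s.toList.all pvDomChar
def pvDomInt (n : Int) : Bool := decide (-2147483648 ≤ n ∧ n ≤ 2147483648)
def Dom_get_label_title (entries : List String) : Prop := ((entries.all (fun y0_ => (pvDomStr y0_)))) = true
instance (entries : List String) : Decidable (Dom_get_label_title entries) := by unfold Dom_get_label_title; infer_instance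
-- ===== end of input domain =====

-- B replaces the overwrite loop by reading the last element directly; same mapping, "" when empty.


-- ===== PORT A =====
-- loop: title starts "", each entry overwrites it (mapping "filter_seq" to "filter")
def get_label_title (entries : List String) : String :=
  entries.foldl (fun title entry => if entry == "filter_seq" then "filter" else entry) ""

-- ===== PORT B =====
-- read the last element directly; empty list → ""
def get_label_title_alt (entries : List String) : String :=
  match entries.getLast? with
  | none => ""
  | some last => if last == "filter_seq" then "filter" else last

-- ===== PRECONDITION & SPEC =====
def Spec_get_label_title (entries : List String) (out : String) : Prop := out = get_label_title_alt entries
instance (entries : List String) (out : String) : Decidable (Spec_get_label_title entries out) := by unfold Spec_get_label_title; infer_instance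

-- ===== CLAIM (what is proved, stated in full; the proofs are below) =====
def Claim_equal_get_label_title : Prop := ∀ (entries : List String), Dom_get_label_title entries → Spec_get_label_title entries (get_label_title entries)

-- ===== LEMMAS AND PROOFS =====
theorem foldl_last (entries : List String) (acc : String) :
    entries.foldl (fun _ entry => if entry == "filter_seq" then "filter" else entry) acc =
      match entries.getLast? with
      | none => acc
      | some last => if last == "filter_seq" then "filter" else last := by
  induction entries generalizing acc with
  | nil => rfl
  | cons e es ih =>
    cases es with
    | nil => rfl
    | cons f fs =>
      simp only [List.foldl_cons, ih]
      rfl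

-- ===== VERDICT (by name: the statement is the Claim_ definition above) =====
theorem get_label_title_spec : Claim_equal_get_label_title := by
  intro entries _
  unfold Spec_get_label_title get_label_title get_label_title_alt
  exact foldl_last entries ""
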